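-- pv_equiv track=rewrite | github.com/Hibari-II/XMAS-Challenge | src/Day 4/file.py | createPassports
-- ===== SOURCE A (Python) =====
-- def createPassports(data: list = None) -> dict:
--     if data is None:
--         return
--     passports = [dict()]
--     countPerson = 0
--
--     for i in range(len(data)):
--         line = data[i]
--         if (line == '\n'):
--             countPerson += 1
--             passports.append(dict())
--             continue
--
--         for substr in line.split(' '):
--             pKey = substr.split(':')[0]
--             pValue = substr.split(':')[1] if ('\n' not in substr) else substr.split(':')[1].split('\n')[0]
--             passports[countPerson].update({pKey:pValue})
--     return passports
-- ===== SOURCE B (Python) =====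
-- def createPassports(data: list = None) -> dict:
--     # Same return value, different decomposition: first split the lines into
--     # groups at '\n' separators, then map each group to its dict.
--     if data is None:
--         return
--     groups = []
--     cur = []
--     for line in data:
--         if line == '\n':
--             groups.append(cur)
--             cur = []
--         else:
--             cur.append(line)
--     groups.append(cur)
--
--     def build(group):
--         d = {}
--         for line in group:
--             for tok in line.split(' '):
--                 parts = tok.split(':')
--                 v = parts[1]
--                 d[parts[0]] = v.split('\n')[0] if '\n' in tok else v
--         return d
--
--     return [build(g) for g in groups]
-- ===== Notes on version B (the rewrite author's own statement) =====
-- stated objective: simpler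
-- what changed: B replaces A's index-counter loop that mutates passports[countPerson] in place with a two-phase decomposition: first split the lines into groups at '\n' separators, then map each group independently to its dict.
import Mathlib
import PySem

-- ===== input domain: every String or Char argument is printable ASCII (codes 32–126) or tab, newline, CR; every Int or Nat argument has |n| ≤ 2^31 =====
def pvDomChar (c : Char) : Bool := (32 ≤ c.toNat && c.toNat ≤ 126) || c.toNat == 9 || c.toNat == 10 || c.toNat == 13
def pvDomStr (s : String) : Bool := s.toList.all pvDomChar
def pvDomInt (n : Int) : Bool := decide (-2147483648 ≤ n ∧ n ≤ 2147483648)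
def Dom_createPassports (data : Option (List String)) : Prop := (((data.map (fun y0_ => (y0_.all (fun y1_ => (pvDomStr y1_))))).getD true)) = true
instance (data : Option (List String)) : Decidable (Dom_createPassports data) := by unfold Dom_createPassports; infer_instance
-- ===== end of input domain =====

-- B re-decomposes A: split the lines into groups at '\n' separators first, then map
-- each group to its dict (same return value; objective: simpler decomposition).

-- ===== PORT A =====
-- s.split(sep) with the nonempty separators ':', ' ', '\n' used below (split? is none only for sep = "")
def pvSplit (s sep : String) : List String := (PySem.Str.split? s sep).getD []

-- one token of the inner loop of A: passports[countPerson].update({pKey:pValue})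
-- (the [1] index is exact under Pre_: every token contains ':'; getD's default is never used there)
def pvAInner (d : PySem.Dict String String) (substr : String) : PySem.Dict String String :=
  let pKey := (pvSplit substr ":").getD 0 ""
  let pValue := if PySem.Str.isIn "\n" substr = false
    then (pvSplit substr ":").getD 1 ""
    else (pvSplit ((pvSplit substr ":").getD 1 "") "\n").getD 0 ""
  d.insert pKey pValue

-- passports[countPerson].update(…): in-place modification of the list element at countPerson
def pvUpdAt {α : Type} (i : Nat) (f : α → α) : List α → List α
  | [] => []
  | x :: xs => if i = 0 then f x :: xs else x :: pvUpdAt (i - 1) f xs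

def pvAStep (st : List (PySem.Dict String String) × Nat) (line : String) :
    List (PySem.Dict String String) × Nat :=
  if line = "\n" then (st.1 ++ [PySem.Dict.empty], st.2 + 1)
  else (pvUpdAt st.2 (fun d => (pvSplit line " ").foldl pvAInner d) st.1, st.2)

def createPassports (data : Option (List String)) : Option (List (List (String × String))) :=
  match data with
  | none => none
  | some data =>
    let fin := (PySem.List.pyRange 0 (PySem.List.len data) 1).foldl
      (fun st i => pvAStep st (PySem.List.pyGetD data i "")) ([PySem.Dict.empty], 0)
    some (fin.1.map (·.items))

-- ===== PORT B =====
-- one token of build's inner loop (the [1] index is exact under Pre_, as in A)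
def pvBTok (d : PySem.Dict String String) (tok : String) : PySem.Dict String String :=
  let parts := pvSplit tok ":"
  let v := parts.getD 1 ""
  d.insert (parts.getD 0 "")
    (if PySem.Str.isIn "\n" tok = true then (pvSplit v "\n").getD 0 "" else v)

def pvBuild (g : List String) : PySem.Dict String String :=
  g.foldl (fun d line => (pvSplit line " ").foldl pvBTok d) PySem.Dict.empty

def pvBStep (st : List (List String) × List String) (line : String) :
    List (List String) × List String :=
  if line = "\n" then (st.1 ++ [st.2], []) else (st.1, st.2 ++ [line])

def createPassports_alt (data : Option (List String)) : Option (List (List (String × String))) :=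
  match data with
  | none => none
  | some data =>
    let st := data.foldl pvBStep ([], [])
    some (((st.1 ++ [st.2]).map pvBuild).map (·.items))

-- ===== PRECONDITION & SPEC =====
-- Pre_ excludes exactly the inputs on which the Python A raises IndexError:
-- some non-separator line has a space-separated token with no ':' in it (B raises there too).
def Pre_createPassports (data : Option (List String)) : Prop :=
  ∀ l ∈ data.getD [], l ≠ "\n" →
    ∀ t ∈ pvSplit l " ", PySem.Str.isIn ":" t = true
instance (data : Option (List String)) : Decidable (Pre_createPassports data) := by
  unfold Pre_createPassports; infer_instance

def pvWitness_createPassports : Option (List String) := some ["a:1 b:2\n", "\n", "c:3"]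

def Spec_createPassports (data : Option (List String)) (out : Option (List (List (String × String)))) : Prop := out = createPassports_alt data
instance (data : Option (List String)) (out : Option (List (List (String × String)))) : Decidable (Spec_createPassports data out) := by unfold Spec_createPassports; infer_instance

-- ===== CLAIM (what is proved, stated in full; the proofs are below) =====
def Claim_equal_createPassports : Prop := ∀ (data : Option (List String)), Dom_createPassports data → Pre_createPassports data → Spec_createPassports data (createPassports data)

-- ===== LEMMAS AND PROOFS =====

theorem pvInner_eq (d : PySem.Dict String String) (s : String) : pvAInner d s = pvBTok d s := by
  cases hc : PySem.Chars.isIn ['\n'] s.toList <;> simp [pvAInner, pvBTok, hc]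

theorem pvUpdAt_len_append {α : Type} (f : α → α) (xs : List α) (y : α) :
    pvUpdAt xs.length f (xs ++ [y]) = xs ++ [f y] := by
  induction xs with
  | nil => simp [pvUpdAt]
  | cons x xs ih => simp [pvUpdAt, ih]

-- the loop invariant: A's state is B's groups-so-far, mapped through pvBuild
theorem pvLoop_eq (rest : List String) (gs : List (List String)) (cur : List String) :
    (rest.foldl pvAStep (gs.map pvBuild ++ [pvBuild cur], gs.length)).1
    = ((rest.foldl pvBStep (gs, cur)).1 ++ [(rest.foldl pvBStep (gs, cur)).2]).map pvBuild := by
  induction rest generalizing gs cur with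
  | nil => simp
  | cons l rest ih =>
    by_cases h : l = "\n"
    · have hA : pvAStep (gs.map pvBuild ++ [pvBuild cur], gs.length) l
          = ((gs ++ [cur]).map pvBuild ++ [pvBuild []], (gs ++ [cur]).length) := by
        simp [pvAStep, h, pvBuild]
      have hB : pvBStep (gs, cur) l = (gs ++ [cur], []) := by simp [pvBStep, h]
      simpa [List.foldl_cons, hA, hB] using ih (gs ++ [cur]) []
    · have hf : pvAInner = pvBTok := funext fun d => funext fun s => pvInner_eq d s
      have hA : pvAStep (gs.map pvBuild ++ [pvBuild cur], gs.length) l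
          = (gs.map pvBuild ++ [pvBuild (cur ++ [l])], gs.length) := by
        have hlen : gs.length = (gs.map pvBuild).length := by simp
        simp only [pvAStep, h, hf]
        rw [hlen, pvUpdAt_len_append]
        simp [pvBuild, List.foldl_append]
      have hB : pvBStep (gs, cur) l = (gs, cur ++ [l]) := by simp [pvBStep, h]
      simpa [List.foldl_cons, hA, hB] using ih gs (cur ++ [l])

-- ===== VERDICT (by name: the statement is the Claim_ definition above) =====
theorem createPassports_spec : Claim_equal_createPassports := by
  intro data _ _
  unfold Spec_createPassports createPassports createPassports_alt
  cases data with
  | none => rfl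
  | some data =>
    simp only []
    rw [PySem.List.foldl_pyRange_zero_pyGetD data "" pvAStep ([PySem.Dict.empty], 0)]
    have h := pvLoop_eq data [] []
    simp only [List.length_nil] at h
    simp only [List.map_nil, List.nil_append] at h
    rw [show pvBuild [] = PySem.Dict.empty from rfl] at h
    rw [h]
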